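-- pv_equiv track=rewrite | github.com/letcodesin/Programmers | 220303_programmers_greedy_lev1_체육복.py | solution
-- ===== SOURCE A (Python) =====
-- def solution(n, lost, reserve):
--     answer = 0
--     new_reserve = set(reserve) - set(lost)
--     new_lost = set(lost) - set(reserve)
--     for r in sorted(new_reserve):
--         if r-1 in new_lost:
--             new_lost = new_lost - {r-1}
--         elif r+1 in new_lost:
--             new_lost = new_lost - {r+1}
--     answer = n - len(new_lost)
--     return answer
-- ===== SOURCE B (Python) =====
-- def solution(n, lost, reserve):
--     # two-pointer merge over the two sorted distinct lists instead of
--     # repeated set-difference updates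
--     L = sorted(set(lost) - set(reserve))
--     R = sorted(set(reserve) - set(lost))
--     i = j = 0
--     remaining = 0
--     while i < len(L):
--         if j == len(R):
--             remaining += len(L) - i
--             break
--         if L[i] < R[j] - 1:
--             remaining += 1
--             i += 1
--         elif L[i] <= R[j] + 1:
--             i += 1
--             j += 1
--         else:
--             j += 1
--     return n - remaining
-- ===== Notes on version B (the rewrite author's own statement) =====
-- stated objective: faster
-- what changed: Replaces the fold over sorted reserves that rebuilds the lost set by set-difference on each match with a single two-pointer merge over the two sorted distinct lists that counts unmatched lost students directly.
import Mathlib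
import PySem

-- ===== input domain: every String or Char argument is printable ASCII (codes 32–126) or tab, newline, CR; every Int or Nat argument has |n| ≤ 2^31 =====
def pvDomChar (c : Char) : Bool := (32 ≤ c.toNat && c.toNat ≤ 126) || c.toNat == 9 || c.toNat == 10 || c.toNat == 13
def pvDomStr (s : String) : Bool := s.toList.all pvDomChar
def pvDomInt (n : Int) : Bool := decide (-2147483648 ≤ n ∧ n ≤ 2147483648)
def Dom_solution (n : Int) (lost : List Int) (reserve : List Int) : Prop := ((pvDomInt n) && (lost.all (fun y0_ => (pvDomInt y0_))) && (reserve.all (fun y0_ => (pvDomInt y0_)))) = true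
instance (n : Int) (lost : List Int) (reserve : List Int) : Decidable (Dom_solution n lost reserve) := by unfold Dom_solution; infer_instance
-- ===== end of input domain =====

-- B replaces A's fold over sorted reserves with set-difference updates by a
-- two-pointer merge over the two sorted distinct lists (alternative algorithm).


-- ===== PORT A =====
-- loop body of A's for-loop, extracted as a helper (state: the set new_lost)
def stepA (nl : PySem.Set Int) (r : Int) : PySem.Set Int :=
  if (r - 1) ∈ nl then PySem.Set.diff nl [r - 1]
  else if (r + 1) ∈ nl then PySem.Set.diff nl [r + 1]
  else nl

def solution (n : Int) (lost : List Int) (reserve : List Int) : Int :=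
  let new_reserve : PySem.Set Int := PySem.Set.diff (PySem.Set.ofList reserve) (PySem.Set.ofList lost)
  let new_lost0 : PySem.Set Int := PySem.Set.diff (PySem.Set.ofList lost) (PySem.Set.ofList reserve)
  let new_lost := (PySem.List.sorted new_reserve (fun x => x) false).foldl stepA new_lost0
  n - (new_lost.length : Int)

-- ===== PORT B =====
-- the two-pointer while loop of Source B: recursion on the two sorted lists,
-- returning the number of unmatched lost students ("remaining")
def tpGo (L R : List Int) : Int :=
  match L, R with
  | [], _ => 0
  | l :: L', [] => ((l :: L').length : Int)
  | l :: L', r :: R' =>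
    if l < r - 1 then 1 + tpGo L' (r :: R')
    else if l ≤ r + 1 then tpGo L' R'
    else tpGo (l :: L') R'
termination_by L.length + R.length

def solution_alt (n : Int) (lost : List Int) (reserve : List Int) : Int :=
  let L := PySem.List.sorted (PySem.Set.diff (PySem.Set.ofList lost) (PySem.Set.ofList reserve)) (fun x => x) false
  let R := PySem.List.sorted (PySem.Set.diff (PySem.Set.ofList reserve) (PySem.Set.ofList lost)) (fun x => x) false
  n - tpGo L R

-- ===== PRECONDITION & SPEC =====
def Spec_solution (n : Int) (lost : List Int) (reserve : List Int) (out : Int) : Prop := out = solution_alt n lost reserve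
instance (n : Int) (lost : List Int) (reserve : List Int) (out : Int) : Decidable (Spec_solution n lost reserve out) := by unfold Spec_solution; infer_instance

-- ===== CLAIM (what is proved, stated in full; the proofs are below) =====
def Claim_equal_solution : Prop := ∀ (n : Int) (lost : List Int) (reserve : List Int), Dom_solution n lost reserve → Spec_solution n lost reserve (solution n lost reserve)

-- ===== LEMMAS AND PROOFS =====

lemma stepA_nil (r : Int) : stepA [] r = [] := by
  simp [stepA]

lemma foldA_nil (R : List Int) : R.foldl stepA [] = [] := by
  induction R with
  | nil => rfl
  | cons r R ih => simp [List.foldl_cons, stepA_nil, ih]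

lemma stepA_nodup {s : List Int} (h : s.Nodup) (r : Int) : (stepA s r).Nodup := by
  unfold stepA; split_ifs <;> first | exact h.filter _ | exact h

lemma stepA_mem_iff {s s' : List Int} (h : ∀ x, x ∈ s ↔ x ∈ s') (r : Int) :
    ∀ x, x ∈ stepA s r ↔ x ∈ stepA s' r := by
  intro x
  by_cases c1 : (r - 1) ∈ s
  · have c1' : (r - 1) ∈ s' := (h _).1 c1
    simp [stepA, c1, c1', PySem.Set.diff, List.mem_filter, h x]
  · have c1' : ¬ (r - 1) ∈ s' := fun hc => c1 ((h _).2 hc)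
    by_cases c2 : (r + 1) ∈ s
    · have c2' : (r + 1) ∈ s' := (h _).1 c2
      simp [stepA, c1, c1', c2, c2', PySem.Set.diff, List.mem_filter, h x]
    · have c2' : ¬ (r + 1) ∈ s' := fun hc => c2 ((h _).2 hc)
      simp [stepA, c1, c1', c2, c2', h x]

lemma foldA_length_eq {R : List Int} : ∀ {s s' : List Int}, s.Nodup → s'.Nodup →
    (∀ x, x ∈ s ↔ x ∈ s') → (R.foldl stepA s).length = (R.foldl stepA s').length := by
  induction R with
  | nil =>
    intro s s' hs hs' hm
    exact ((List.perm_ext_iff_of_nodup hs hs').2 hm).length_eq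
  | cons r R ih =>
    intro s s' hs hs' hm
    exact ih (stepA_nodup hs r) (stepA_nodup hs' r) (stepA_mem_iff hm r)

lemma stepA_far {s : List Int} {l r : Int} (h1 : r - 1 ≠ l) (h2 : r + 1 ≠ l) :
    stepA (l :: s) r = l :: stepA s r := by
  by_cases m1 : (r - 1) ∈ s <;> by_cases m2 : (r + 1) ∈ s <;>
    simp [stepA, List.mem_cons, m1, m2, h1, h2, Ne.symm h1, Ne.symm h2,
          PySem.Set.diff, List.contains_eq_mem]

lemma foldA_cons_skip (l : Int) : ∀ (R s : List Int), (∀ r ∈ R, l < r - 1) →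
    R.foldl stepA (l :: s) = l :: R.foldl stepA s := by
  intro R
  induction R with
  | nil => intro s _; rfl
  | cons r R ih =>
    intro s hall
    have h1 : r - 1 ≠ l := by have := hall r (by simp); omega
    have h2 : r + 1 ≠ l := by have := hall r (by simp); omega
    simp only [List.foldl_cons, stepA_far h1 h2]
    exact ih _ (fun r' hr' => hall r' (by simp [hr']))

-- stepA with the head matched on the left (l = r - 1): the head is consumed
lemma stepA_hit_left {L' : List Int} {l r : Int} (hl : l = r - 1)
    (hgt : ∀ y ∈ L', l < y) : stepA (l :: L') r = L' := by
  unfold stepA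
  have hmem : (r - 1) ∈ l :: L' := by simp [hl]
  rw [if_pos hmem]
  simp only [PySem.Set.diff, List.filter_cons]
  have : ¬ (r - 1) ∈ L' := fun h => by have := hgt _ h; omega
  simp [List.contains_eq_mem, hl, List.filter_eq_self]
  intro a ha
  have := hgt a ha; omega

-- stepA with the head matched on the right (l = r + 1)
lemma stepA_hit_right {L' : List Int} {l r : Int} (hl : l = r + 1)
    (hgt : ∀ y ∈ L', l < y) : stepA (l :: L') r = L' := by
  unfold stepA
  have hm1 : ¬ (r - 1) ∈ l :: L' := by
    simp only [List.mem_cons, not_or]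
    exact ⟨by omega, fun h => by have := hgt _ h; omega⟩
  rw [if_neg hm1]
  have hmem : (r + 1) ∈ l :: L' := by simp [hl]
  rw [if_pos hmem]
  simp only [PySem.Set.diff, List.filter_cons]
  simp [List.contains_eq_mem, hl, List.filter_eq_self]
  intro a ha
  have := hgt a ha; omega

-- stepA with the head far to the right (r + 1 < l): nothing changes
lemma stepA_miss {L' : List Int} {l r : Int} (hl : r + 1 < l)
    (hgt : ∀ y ∈ L', l < y) : stepA (l :: L') r = l :: L' := by
  unfold stepA
  have hm1 : ¬ (r - 1) ∈ l :: L' := by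
    simp only [List.mem_cons, not_or]
    exact ⟨by omega, fun h => by have := hgt _ h; omega⟩
  have hm2 : ¬ (r + 1) ∈ l :: L' := by
    simp only [List.mem_cons, not_or]
    exact ⟨by omega, fun h => by have := hgt _ h; omega⟩
  rw [if_neg hm1, if_neg hm2]

lemma main_lemma (L R : List Int) :
    L.Pairwise (· < ·) → R.Pairwise (· < ·) → (∀ x ∈ L, x ∉ R) →
    ((R.foldl stepA L).length : Int) = tpGo L R := by
  induction L, R using tpGo.induct with
  | case1 R =>
    intro _ _ _
    rw [foldA_nil]
    simp [tpGo]
  | case2 l L' =>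
    intro _ _ _
    simp [tpGo]
  | case3 l L' r R' hlt ih =>
    intro hL hR hd
    have hall : ∀ r' ∈ r :: R', l < r' - 1 := by
      intro r' hr'
      rcases List.mem_cons.1 hr' with h | h
      · omega
      · have := (List.pairwise_cons.1 hR).1 r' h; omega
    rw [foldA_cons_skip l (r :: R') L' hall]
    rw [tpGo, if_pos hlt]
    have := ih hL.of_cons hR (fun x hx => hd x (List.mem_cons_of_mem _ hx))
    simp only [List.length_cons]
    push_cast
    omega
  | case4 l L' r R' hnlt hle ih =>
    intro hL hR hd
    have hgt : ∀ y ∈ L', l < y := (List.pairwise_cons.1 hL).1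
    have hne : l ≠ r := fun h => hd l (by simp) (by simp [h])
    have hstep : stepA (l :: L') r = L' := by
      rcases (by omega : l = r - 1 ∨ l = r + 1) with h | h
      · exact stepA_hit_left h hgt
      · exact stepA_hit_right h hgt
    rw [List.foldl_cons, hstep, tpGo, if_neg hnlt, if_pos hle]
    exact ih hL.of_cons hR.of_cons
      (fun x hx => fun hxR => hd x (List.mem_cons_of_mem _ hx) (List.mem_cons_of_mem _ hxR))
  | case5 l L' r R' hnlt hnle ih =>
    intro hL hR hd
    have hgt : ∀ y ∈ L', l < y := (List.pairwise_cons.1 hL).1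
    rw [List.foldl_cons, stepA_miss (by omega) hgt, tpGo, if_neg hnlt, if_neg hnle]
    exact ih hL hR.of_cons (fun x hx => fun hxR => hd x hx (List.mem_cons_of_mem _ hxR))

lemma pairwise_lt_sorted_of_nodup {xs : List Int} (h : xs.Nodup) :
    (PySem.List.sorted xs (fun x => x) false).Pairwise (· < ·) := by
  have hle := PySem.List.sorted_pairwise xs (fun x => x)
  have hnd : (PySem.List.sorted xs (fun x => x) false).Nodup :=
    (PySem.List.sorted_perm xs (fun x => x) false).nodup_iff.2 h
  exact (hle.and hnd).imp (fun hab => lt_of_le_of_ne hab.1 hab.2)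

-- ===== VERDICT (by name: the statement is the Claim_ definition above) =====
theorem solution_spec : Claim_equal_solution := by
  intro n lost reserve _
  unfold Spec_solution solution solution_alt
  simp only []
  set Ld : List Int := PySem.Set.diff (PySem.Set.ofList lost) (PySem.Set.ofList reserve) with hLd
  set Rd : List Int := PySem.Set.diff (PySem.Set.ofList reserve) (PySem.Set.ofList lost) with hRd
  have hLdnd : Ld.Nodup := PySem.Set.nodup_diff _ _ (PySem.Set.nodup_ofList lost)
  have hRdnd : Rd.Nodup := PySem.Set.nodup_diff _ _ (PySem.Set.nodup_ofList reserve)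
  set Ls := PySem.List.sorted Ld (fun x => x) false with hLs
  set Rs := PySem.List.sorted Rd (fun x => x) false with hRs
  have hLsnd : Ls.Nodup := (PySem.List.sorted_perm Ld (fun x => x) false).nodup_iff.2 hLdnd
  have hmem : ∀ x, x ∈ Ld ↔ x ∈ Ls := fun x => (PySem.List.mem_sorted Ld (fun y => y) false x).symm
  have hlen : (Rs.foldl stepA Ld).length = (Rs.foldl stepA Ls).length :=
    foldA_length_eq hLdnd hLsnd hmem
  have hdisj : ∀ x ∈ Ls, x ∉ Rs := by
    intro x hx hxR
    have hx1 : x ∈ Ld := (hmem x).2 hx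
    have hx2 : x ∈ Rd := (PySem.List.mem_sorted Rd (fun y => y) false x).1 hxR
    have := (PySem.Set.mem_diff _ _ x).1 hx1
    have := (PySem.Set.mem_diff _ _ x).1 hx2
    tauto
  have hmain := main_lemma Ls Rs (pairwise_lt_sorted_of_nodup hLdnd)
    (pairwise_lt_sorted_of_nodup hRdnd) hdisj
  rw [hlen] at *
  omega
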